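-- pv_equiv track=rewrite | github.com/ericweigle/aoc2020 | day24/day24.py | tokens_to_coord
-- ===== SOURCE A (Python) =====
-- def tokens_to_coord(tokens):
--   row, col = (0,0)
--   for token in tokens:
--     if token  == 'e':
--       col+=2
--     elif token  == 'w':
--       col-=2
--     elif token == 'se':
--       row-=1
--       col+=1
--     elif token == 'sw':
--       row-=1
--       col-=1
--     elif token == 'ne':
--       row+=1
--       col+=1
--     elif token == 'nw':
--       row+=1
--       col-=1
--   return (row, col)
-- ===== SOURCE B (Python) =====
-- def tokens_to_coord(tokens):
--   e, w, se, sw, ne, nw = (tokens.count(k) for k in ('e', 'w', 'se', 'sw', 'ne', 'nw'))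
--   return (ne + nw - se - sw, 2 * (e - w) + ne - nw + se - sw)
-- ===== Notes on version B (the rewrite author's own statement) =====
-- stated objective: simpler
-- what changed: B replaces the per-token branch-and-mutate loop by counting each direction token's multiplicity and computing the coordinate as a closed-form linear combination of the six counts.
import Mathlib
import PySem

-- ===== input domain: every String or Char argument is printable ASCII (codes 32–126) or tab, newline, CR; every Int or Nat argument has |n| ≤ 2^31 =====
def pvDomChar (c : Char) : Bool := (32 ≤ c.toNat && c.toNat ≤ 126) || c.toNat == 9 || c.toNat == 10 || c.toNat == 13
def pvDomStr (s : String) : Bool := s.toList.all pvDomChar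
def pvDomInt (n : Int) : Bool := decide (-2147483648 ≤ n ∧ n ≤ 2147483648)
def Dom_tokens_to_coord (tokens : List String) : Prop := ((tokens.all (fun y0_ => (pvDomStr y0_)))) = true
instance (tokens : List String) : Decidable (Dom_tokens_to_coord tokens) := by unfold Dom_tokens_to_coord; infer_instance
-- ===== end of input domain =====

-- B counts each direction token once and computes the coordinate as a closed-form linear combination of the six counts (objective: simpler).
-- ===== PORT A =====
def tokens_to_coord (tokens : List String) : Int × Int :=
  tokens.foldl (fun (rc : Int × Int) token =>
    if token == "e" then (rc.1, rc.2 + 2)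
    else if token == "w" then (rc.1, rc.2 - 2)
    else if token == "se" then (rc.1 - 1, rc.2 + 1)
    else if token == "sw" then (rc.1 - 1, rc.2 - 1)
    else if token == "ne" then (rc.1 + 1, rc.2 + 1)
    else if token == "nw" then (rc.1 + 1, rc.2 - 1)
    else rc) (0, 0)

-- ===== PORT B =====
def tokens_to_coord_alt (tokens : List String) : Int × Int :=
  let e  : Int := PySem.List.count tokens "e"
  let w  : Int := PySem.List.count tokens "w"
  let se : Int := PySem.List.count tokens "se"
  let sw : Int := PySem.List.count tokens "sw"
  let ne : Int := PySem.List.count tokens "ne"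
  let nw : Int := PySem.List.count tokens "nw"
  (ne + nw - se - sw, 2 * (e - w) + ne - nw + se - sw)

-- ===== PRECONDITION & SPEC =====
def Spec_tokens_to_coord (tokens : List String) (out : Int × Int) : Prop := out = tokens_to_coord_alt tokens
instance (tokens : List String) (out : Int × Int) : Decidable (Spec_tokens_to_coord tokens out) := by unfold Spec_tokens_to_coord; infer_instance

-- ===== CLAIM (what is proved, stated in full; the proofs are below) =====
def Claim_equal_tokens_to_coord : Prop := ∀ (tokens : List String), Dom_tokens_to_coord tokens → Spec_tokens_to_coord tokens (tokens_to_coord tokens)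

-- ===== LEMMAS AND PROOFS =====

-- ===== VERDICT (by name: the statement is the Claim_ definition above) =====
lemma ttc_fold (tokens : List String) (r c : Int) :
    tokens.foldl (fun (rc : Int × Int) token =>
      if token == "e" then (rc.1, rc.2 + 2)
      else if token == "w" then (rc.1, rc.2 - 2)
      else if token == "se" then (rc.1 - 1, rc.2 + 1)
      else if token == "sw" then (rc.1 - 1, rc.2 - 1)
      else if token == "ne" then (rc.1 + 1, rc.2 + 1)
      else if token == "nw" then (rc.1 + 1, rc.2 - 1)
      else rc) (r, c)
    = (r + (tokens.count "ne" : Int) + tokens.count "nw" - tokens.count "se" - tokens.count "sw",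
       c + 2 * ((tokens.count "e" : Int) - tokens.count "w") + tokens.count "ne" - tokens.count "nw" + tokens.count "se" - tokens.count "sw") := by
  induction tokens generalizing r c with
  | nil => simp
  | cons t ts ih =>
    simp only [List.foldl_cons]
    split_ifs with h1 h2 h3 h4 h5 h6
    · have ht : t = "e" := by simpa using h1
      subst ht; rw [ih]; simp [List.count_cons, Prod.ext_iff]; push_cast; omega
    · have ht : t = "w" := by simpa using h2
      subst ht; rw [ih]; simp [List.count_cons, Prod.ext_iff]; push_cast; omega
    · have ht : t = "se" := by simpa using h3
      subst ht; rw [ih]; simp [List.count_cons, Prod.ext_iff]; push_cast; omega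
    · have ht : t = "sw" := by simpa using h4
      subst ht; rw [ih]; simp [List.count_cons, Prod.ext_iff]; push_cast; omega
    · have ht : t = "ne" := by simpa using h5
      subst ht; rw [ih]; simp [List.count_cons, Prod.ext_iff]; push_cast; omega
    · have ht : t = "nw" := by simpa using h6
      subst ht; rw [ih]; simp [List.count_cons, Prod.ext_iff]; push_cast; omega
    · rw [ih]; simp [List.count_cons, h1, h2, h3, h4, h5, h6]

theorem tokens_to_coord_spec : Claim_equal_tokens_to_coord := by
  intro tokens _
  unfold Spec_tokens_to_coord tokens_to_coord tokens_to_coord_alt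
  rw [ttc_fold]
  simp [PySem.List.count]
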